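-- pv_equiv track=rewrite | github.com/mart31/stock-trading-predictions | db_histo_updater.py | find_daily_missing_date
-- ===== SOURCE A (Python) =====
-- def find_daily_missing_date(ticker_dict):
--
--     missing_date = []
--
--     found_first = False
--     for d in ticker_dict:
--         if len(ticker_dict[d])==0:
--             if found_first:
--                 missing_date.append(d)
--         else:
--             found_first=True
--
--     return missing_date
-- ===== SOURCE B (Python) =====
-- def find_daily_missing_date(ticker_dict):
--     keys = list(ticker_dict)
--     i = 0
--     while i < len(keys) and len(ticker_dict[keys[i]]) == 0:
--         i += 1
--     return [k for k in keys[i+1:] if len(ticker_dict[k]) == 0]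
-- ===== Notes on version B (the rewrite author's own statement) =====
-- stated objective: alternative
-- what changed: Replaces the single stateful scan with a boolean flag by a two-phase decomposition: first find the index past the leading run of empty-valued keys, then a comprehension over the keys after the first non-empty one collecting the empty ones.
import Mathlib
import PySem

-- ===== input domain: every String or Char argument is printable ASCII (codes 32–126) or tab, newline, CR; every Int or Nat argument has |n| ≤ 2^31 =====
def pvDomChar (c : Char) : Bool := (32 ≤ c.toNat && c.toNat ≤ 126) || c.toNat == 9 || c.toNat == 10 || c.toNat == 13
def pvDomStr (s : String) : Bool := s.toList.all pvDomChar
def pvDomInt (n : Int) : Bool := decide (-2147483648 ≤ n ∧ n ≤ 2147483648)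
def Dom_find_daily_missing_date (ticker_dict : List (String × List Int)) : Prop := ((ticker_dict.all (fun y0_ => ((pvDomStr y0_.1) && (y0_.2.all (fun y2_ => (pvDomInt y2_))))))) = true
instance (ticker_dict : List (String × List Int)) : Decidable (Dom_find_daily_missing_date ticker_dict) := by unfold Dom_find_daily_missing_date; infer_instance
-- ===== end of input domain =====

-- B replaces A's single flag-carrying scan by a two-phase decomposition (drop the leading
-- run of empty-valued keys, then filter the keys after the first non-empty one); alternative, same cost.


-- ===== PORT A =====
-- loop body of A: state = (missing_date, found_first); iterating the dict gives each key with
-- its value (keys of a Python dict are unique, so ticker_dict[d] is the pair's own value)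
def pvStepA (st : List String × Bool) (d : String × List Int) : List String × Bool :=
  if d.2.length == 0 then
    (if st.2 then st.1 ++ [d.1] else st.1, st.2)
  else
    (st.1, true)

def find_daily_missing_date (ticker_dict : List (String × List Int)) : List String :=
  (ticker_dict.foldl pvStepA (([] : List String), false)).1

-- ===== PORT B =====
def find_daily_missing_date_alt (ticker_dict : List (String × List Int)) : List String :=
  match ticker_dict.dropWhile (fun p => p.2.length == 0) with
  | [] => []
  | _ :: tail => (tail.filter (fun p => p.2.length == 0)).map Prod.fst

-- ===== PRECONDITION & SPEC =====
def Spec_find_daily_missing_date (ticker_dict : List (String × List Int)) (out : List String) : Prop := out = find_daily_missing_date_alt ticker_dict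
instance (ticker_dict : List (String × List Int)) (out : List String) : Decidable (Spec_find_daily_missing_date ticker_dict out) := by unfold Spec_find_daily_missing_date; infer_instance

-- ===== CLAIM (what is proved, stated in full; the proofs are below) =====
def Claim_equal_find_daily_missing_date : Prop := ∀ (ticker_dict : List (String × List Int)), Dom_find_daily_missing_date ticker_dict → Spec_find_daily_missing_date ticker_dict (find_daily_missing_date ticker_dict)

-- ===== LEMMAS AND PROOFS =====
-- once found_first is true, A just appends every empty-valued key
theorem pv_foldA_true (l : List (String × List Int)) (acc : List String) :
    (l.foldl pvStepA (acc, true)).1 = acc ++ (l.filter (fun p => p.2.length == 0)).map Prod.fst := by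
  induction l generalizing acc with
  | nil => simp
  | cons h t ih =>
    by_cases hh : h.2.length = 0 <;>
      simp [List.foldl_cons, pvStepA, hh, ih]

-- while found_first is false, A skips leading empty-valued keys without collecting anything
theorem pv_foldA_false (l : List (String × List Int)) :
    (l.foldl pvStepA (([] : List String), false)).1 = find_daily_missing_date_alt l := by
  induction l with
  | nil => simp [find_daily_missing_date_alt]
  | cons h t ih =>
    by_cases hh : h.2.length = 0
    · simpa [List.foldl_cons, pvStepA, hh, find_daily_missing_date_alt,
        List.dropWhile_cons] using ih
    · simp [List.foldl_cons, pvStepA, hh, find_daily_missing_date_alt,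
        pv_foldA_true]

-- ===== VERDICT (by name: the statement is the Claim_ definition above) =====
theorem find_daily_missing_date_spec : Claim_equal_find_daily_missing_date := by
  intro td _
  unfold Spec_find_daily_missing_date find_daily_missing_date
  exact pv_foldA_false td
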